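-- pv_equiv track=rewrite | github.com/lamperi/aoc | 2021/10/solve.py | part2
-- ===== SOURCE A (Python) =====
-- syntax_pairs={
--     "(": ")",
--     "[": "]",
--     "{": "}",
--     "<": ">",
-- }
--
-- points_to_complete={
--     "(": 1,
--     "[": 2,
--     "{": 3,
--     "<": 4,
-- }
--
-- def part2(data):
--     scores=[]
--     for line in data.splitlines():
--         s = []
--         bad = False
--         for c in line:
--             if c in "([{<":
--                 s.append(c)
--             elif c in ")]}>":
--                 if len(s) == 0 or c != syntax_pairs[s.pop()]:
--                     bad=True
--                     break
--         if bad: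
--             continue
--         line_score = 0
--         while s:
--             c = s.pop()
--             line_score *= 5
--             line_score += points_to_complete[c]
--         scores.append(line_score)
--     scores.sort()
--     return scores[len(scores)//2]
-- ===== SOURCE B (Python) =====
-- points_to_complete={
--     "(": 1,
--     "[": 2,
--     "{": 3,
--     "<": 4,
-- }
--
-- def part2(data):
--     scores = []
--     for line in data.splitlines():
--         residue = ''.join(c for c in line if c in "()[]{}<>")
--         while True:
--             reduced = residue.replace("()", "").replace("[]", "").replace("{}", "").replace("<>", "")
--             if reduced == residue:
--                 break
--             residue = reduced
--         if any(c in ")]}>" for c in residue):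
--             continue  # corrupted line
--         line_score = 0
--         for c in reversed(residue):
--             line_score = line_score * 5 + points_to_complete[c]
--         scores.append(line_score)
--     scores.sort()
--     return scores[len(scores) // 2]
-- ===== Notes on version B (the rewrite author's own statement) =====
-- stated objective: alternative
-- what changed: Replaces A's per-character stack scan (with bad-flag and break) by a fixed-point string reduction that repeatedly deletes adjacent matched bracket pairs until nothing changes; a line is corrupted iff the residue still contains a closing bracket, otherwise the residue is scored right-to-left.
import Mathlib
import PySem

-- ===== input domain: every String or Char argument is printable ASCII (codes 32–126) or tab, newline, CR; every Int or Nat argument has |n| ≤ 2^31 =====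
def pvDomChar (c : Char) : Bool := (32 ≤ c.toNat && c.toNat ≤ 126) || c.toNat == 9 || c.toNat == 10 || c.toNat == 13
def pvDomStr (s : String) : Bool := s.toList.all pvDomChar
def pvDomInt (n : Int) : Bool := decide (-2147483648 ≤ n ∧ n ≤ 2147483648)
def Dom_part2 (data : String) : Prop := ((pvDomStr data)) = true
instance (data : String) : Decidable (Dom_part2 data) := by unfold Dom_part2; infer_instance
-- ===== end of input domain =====

-- B replaces A's per-character stack scan by a fixed-point reduction that repeatedly deletes
-- adjacent matched bracket pairs; an alternative decomposition of equal purpose, not claimed faster.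

-- ===== PORT A =====
def pvSyntaxPairs : PySem.Dict Char Char := PySem.Dict.ofList [('(', ')'), ('[', ']'), ('{', '}'), ('<', '>')]
def pvPoints : PySem.Dict Char Int := PySem.Dict.ofList [('(', 1), ('[', 2), ('{', 3), ('<', 4)]

-- the inner 'for c in line' loop with its break: 'none' = bad line (break taken);
-- 'c in "([{<"' on a single character is list membership of the char; s.append / s.pop() at the end
def pvScanA : List Char → List Char → Option (List Char)
  | [], s => some s
  | c :: rest, s =>
    if "([{<".toList.contains c then pvScanA rest (s ++ [c])
    else if ")]}>".toList.contains c then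
      match PySem.List.pop? s (-1) with
      | none => none                     -- len(s) == 0: bad (short-circuit 'or' pops nothing)
      | some (p, s') =>
        if PySem.Dict.getD pvSyntaxPairs p ' ' ≠ c then none   -- popped p is always an opener, so getD is the dict lookup
        else pvScanA rest s'
    else pvScanA rest s

-- 'while s: c = s.pop(); line_score = line_score*5 + points_to_complete[c]' = fold over the reversed stack
def pvScoreStack (s : List Char) : Int :=
  s.reverse.foldl (fun acc ch => acc * 5 + PySem.Dict.getD pvPoints ch 0) 0

def part2 (data : String) : Int :=
  let scores := (PySem.Str.splitlines data).foldl (fun scores line =>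
    match pvScanA line.toList [] with
    | none => scores                                   -- bad: continue
    | some s => scores ++ [pvScoreStack s]) []
  let sorted := PySem.List.sorted scores (fun x => x) false
  (PySem.List.pyGet? sorted (PySem.Int.floordiv (sorted.length : Int) 2)).getD 0  -- none (IndexError) is excluded by Pre_

-- ===== PORT B =====
-- one round of Source B's four str.replace calls
def pvStep (l : List Char) : List Char :=
  PySem.Chars.replace (PySem.Chars.replace (PySem.Chars.replace
    (PySem.Chars.replace l "()".toList []) "[]".toList []) "{}".toList []) "<>".toList []

-- Source B's 'while True' reduction loop, with fuel = length of the string: every round that changes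
-- the string shortens it, so this fuel provably reaches the fixed point (pvReduceGo_fix below)
def pvReduceGo : Nat → List Char → List Char
  | 0, l => l
  | fuel + 1, l => if pvStep l = l then l else pvReduceGo fuel (pvStep l)

def pvReduce (l : List Char) : List Char := pvReduceGo l.length l

def pvLineB (line : List Char) : Option Int :=
  let residue := pvReduce (line.filter (fun ch => "()[]{}<>".toList.contains ch))
  if residue.any (fun ch => ")]}>".toList.contains ch) then none   -- corrupted: skip
  else some (residue.reverse.foldl (fun acc ch => acc * 5 + PySem.Dict.getD pvPoints ch 0) 0)

def part2_alt (data : String) : Int :=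
  let scores := (PySem.Str.splitlines data).foldl (fun scores line =>
    match pvLineB line.toList with
    | none => scores
    | some v => scores ++ [v]) []
  let sorted := PySem.List.sorted scores (fun x => x) false
  (PySem.List.pyGet? sorted (PySem.Int.floordiv (sorted.length : Int) 2)).getD 0

-- ===== PRECONDITION & SPEC =====
-- an independent (head-first stack) matcher: does the line survive A's scan without 'bad'?
def pvGood : List Char → List Char → Bool
  | [], _ => true
  | ch :: rest, st =>
    if "([{<".toList.contains ch then pvGood rest (ch :: st)
    else if ")]}>".toList.contains ch then
      match st with
      | [] => false
      | o :: st' => (PySem.Dict.getD pvSyntaxPairs o ' ' = ch) && pvGood rest st'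
    else pvGood rest st

-- Pre_ excludes exactly the inputs where A raises IndexError (scores[0] of an empty list):
-- it requires at least one non-corrupted line, so the list of completion scores is nonempty.
def Pre_part2 (data : String) : Prop :=
  (PySem.Str.splitlines data).any (fun line => pvGood line.toList []) = true
instance (data : String) : Decidable (Pre_part2 data) := by unfold Pre_part2; infer_instance

def pvWitness_part2 : String := "[({\n(]"

def Spec_part2 (data : String) (out : Int) : Prop := out = part2_alt data
instance (data : String) (out : Int) : Decidable (Spec_part2 data out) := by unfold Spec_part2; infer_instance

-- ===== CLAIM (what is proved, stated in full; the proofs are below) =====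
def Claim_equal_part2 : Prop := ∀ (data : String), Dom_part2 data → Pre_part2 data → Spec_part2 data (part2 data)

-- ===== LEMMAS AND PROOFS =====

theorem pvOpeners_chars : "([{<".toList = ['(', '[', '{', '<'] := by decide
theorem pvClosers_chars : ")]}>".toList = [')', ']', '}', '>'] := by decide
theorem pvBrackets_chars : "()[]{}<>".toList = ['(', ')', '[', ']', '{', '}', '<', '>'] := by decide

theorem pvOpener_cases (ch : Char) (h : ("([{<".toList.contains ch) = true) :
    ch = '(' ∨ ch = '[' ∨ ch = '{' ∨ ch = '<' := by
  rw [pvOpeners_chars] at h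
  have hm : ch ∈ ['(', '[', '{', '<'] := by simpa using h
  simpa using hm

theorem pvCloser_not_opener (ch : Char) (h : (")]}>".toList.contains ch) = true) :
    ("([{<".toList.contains ch) = false := by
  rw [pvClosers_chars] at h
  have hm : ch ∈ [')', ']', '}', '>'] := by simpa using h
  fin_cases hm <;> decide

theorem pvBracket_split (ch : Char) (hb : ("()[]{}<>".toList.contains ch) = true)
    (hn : (")]}>".toList.contains ch) = false) : ("([{<".toList.contains ch) = true := by
  rw [pvBrackets_chars] at hb; rw [pvClosers_chars] at hn; rw [pvOpeners_chars]
  have hm : ch ∈ ['(', ')', '[', ']', '{', '}', '<', '>'] := by simpa using hb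
  fin_cases hm <;> simp_all

theorem pvOpener_bracket (ch : Char) (h : ("([{<".toList.contains ch) = true) :
    ("()[]{}<>".toList.contains ch) = true := by
  rcases pvOpener_cases ch h with rfl | rfl | rfl | rfl <;> decide

theorem pvCloser_bracket (ch : Char) (h : (")]}>".toList.contains ch) = true) :
    ("()[]{}<>".toList.contains ch) = true := by
  rw [pvClosers_chars] at h
  have hm : ch ∈ [')', ']', '}', '>'] := by simpa using h
  fin_cases hm <;> decide

-- proof-side recursive characterisation of replace old "" s for a two-character pattern
def pvRep (o c : Char) : List Char → List Char
  | x :: y :: t => if x = o ∧ y = c then pvRep o c t else x :: pvRep o c (y :: t)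
  | l => l

theorem pvGo_eq (o c : Char) : ∀ (fuel : Nat) (l acc : List Char), l.length ≤ fuel →
    PySem.Chars.replace.go [o, c] [] fuel l acc = acc.reverse ++ pvRep o c l := by
  intro fuel
  induction fuel with
  | zero =>
    intro l acc h
    have hl : l = [] := by cases l with | nil => rfl | cons a t => simp at h
    subst hl
    simp [PySem.Chars.replace.go, pvRep]
  | succ n ih =>
    intro l acc h
    match l with
    | [] => simp [PySem.Chars.replace.go, pvRep]
    | [x] =>
      have hpre : List.isPrefixOf [o, c] [x] = false := by simp [List.isPrefixOf]
      simp only [PySem.Chars.replace.go, hpre, Bool.false_eq_true, if_false]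
      rw [ih [] (x :: acc) (by simp)]
      simp [pvRep]
    | x :: y :: t =>
      by_cases hm : x = o ∧ y = c
      · have hpre : List.isPrefixOf [o, c] (x :: y :: t) = true := by
          simp [List.isPrefixOf, hm.1, hm.2]
        simp only [PySem.Chars.replace.go, hpre, if_true, List.reverse_nil, List.nil_append,
          List.length_cons, List.drop_succ_cons, List.length_nil, List.drop_zero]
        rw [ih t acc (by simp at h ⊢; omega)]
        rw [show pvRep o c (x :: y :: t) = pvRep o c t from by simp [pvRep, hm.1, hm.2]]
      · have hpre : List.isPrefixOf [o, c] (x :: y :: t) = false := by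
          simp [List.isPrefixOf]
          intro h1 h2; exact hm ⟨ h1.symm, h2.symm ⟩
        simp only [PySem.Chars.replace.go, hpre, Bool.false_eq_true, if_false]
        rw [ih (y :: t) (x :: acc) (by simp at h ⊢; omega)]
        rw [show pvRep o c (x :: y :: t) = x :: pvRep o c (y :: t) from by simp [pvRep, hm]]
        simp

theorem pvReplace_eq_pvRep (o c : Char) (l : List Char) :
    PySem.Chars.replace l [o, c] [] = pvRep o c l := by
  rw [PySem.Chars.replace]
  simp only [List.isEmpty_cons, Bool.false_eq_true, if_false]
  rw [pvGo_eq o c l.length l [] le_rfl]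
  simp

theorem pvRep_length (o c : Char) : ∀ l : List Char, (pvRep o c l).length ≤ l.length := by
  intro l
  induction l using pvRep.induct o c with
  | case1 x y t h ih =>
    rw [show pvRep o c (x :: y :: t) = pvRep o c t from by simp [pvRep, h.1, h.2]]
    simp; omega
  | case2 x y t h ih =>
    rw [show pvRep o c (x :: y :: t) = x :: pvRep o c (y :: t) from by simp [pvRep, h]]
    simpa using ih
  | case3 l h1 =>
    cases l with
    | nil => simp [pvRep]
    | cons a t =>
      cases t with
      | nil => simp [pvRep]
      | cons b t' => exact absurd rfl (h1 a b t')

theorem pvRep_eq_or_lt (o c : Char) :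
    ∀ l : List Char, pvRep o c l = l ∨ (pvRep o c l).length < l.length := by
  intro l
  induction l using pvRep.induct o c with
  | case1 x y t h ih =>
    right
    rw [show pvRep o c (x :: y :: t) = pvRep o c t from by simp [pvRep, h.1, h.2]]
    have := pvRep_length o c t; simp; omega
  | case2 x y t h ih =>
    rw [show pvRep o c (x :: y :: t) = x :: pvRep o c (y :: t) from by simp [pvRep, h]]
    rcases ih with h' | h'
    · left; rw [h']
    · right; simpa using h'
  | case3 l h1 =>
    cases l with
    | nil => left; simp [pvRep]
    | cons a t =>
      cases t with
      | nil => left; simp [pvRep]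
      | cons b t' => exact absurd rfl (h1 a b t')

theorem pvRep_subset (o c : Char) : ∀ l : List Char, ∀ x ∈ pvRep o c l, x ∈ l := by
  intro l
  induction l using pvRep.induct o c with
  | case1 x y t h ih =>
    rw [show pvRep o c (x :: y :: t) = pvRep o c t from by simp [pvRep, h.1, h.2]]
    intro z hz; simp [ih z hz]
  | case2 x y t h ih =>
    rw [show pvRep o c (x :: y :: t) = x :: pvRep o c (y :: t) from by simp [pvRep, h]]
    intro z hz
    rcases List.mem_cons.mp hz with rfl | hz'
    · simp
    · simpa using Or.inr (ih z hz')
  | case3 l h1 =>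
    cases l with
    | nil => simp [pvRep]
    | cons a t =>
      cases t with
      | nil => simp [pvRep]
      | cons b t' => exact absurd rfl (h1 a b t')

theorem pvStep_eq (l : List Char) :
    pvStep l = pvRep '<' '>' (pvRep '{' '}' (pvRep '[' ']' (pvRep '(' ')' l))) := by
  have h1 : "()".toList = ['(', ')'] := by decide
  have h2 : "[]".toList = ['[', ']'] := by decide
  have h3 : "{}".toList = ['{', '}'] := by decide
  have h4 : "<>".toList = ['<', '>'] := by decide
  simp only [pvStep, h1, h2, h3, h4, pvReplace_eq_pvRep]

theorem pvStep_fixed_rep (l : List Char) (h : pvStep l = l) :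
    pvRep '(' ')' l = l ∧ pvRep '[' ']' l = l ∧ pvRep '{' '}' l = l ∧ pvRep '<' '>' l = l := by
  rw [pvStep_eq] at h
  have e1 : pvRep '(' ')' l = l := by
    rcases pvRep_eq_or_lt '(' ')' l with h' | h'
    · exact h'
    · exfalso
      have a1 := pvRep_length '[' ']' (pvRep '(' ')' l)
      have a2 := pvRep_length '{' '}' (pvRep '[' ']' (pvRep '(' ')' l))
      have a3 := pvRep_length '<' '>' (pvRep '{' '}' (pvRep '[' ']' (pvRep '(' ')' l)))
      have hl := congrArg List.length h
      omega
  rw [e1] at h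
  have e2 : pvRep '[' ']' l = l := by
    rcases pvRep_eq_or_lt '[' ']' l with h' | h'
    · exact h'
    · exfalso
      have a2 := pvRep_length '{' '}' (pvRep '[' ']' l)
      have a3 := pvRep_length '<' '>' (pvRep '{' '}' (pvRep '[' ']' l))
      have hl := congrArg List.length h
      omega
  rw [e2] at h
  have e3 : pvRep '{' '}' l = l := by
    rcases pvRep_eq_or_lt '{' '}' l with h' | h'
    · exact h'
    · exfalso
      have a3 := pvRep_length '<' '>' (pvRep '{' '}' l)
      have hl := congrArg List.length h
      omega
  rw [e3] at h
  exact ⟨ e1, e2, e3, h ⟩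

theorem pvStep_subset (l : List Char) : ∀ x ∈ pvStep l, x ∈ l := by
  intro x hx
  rw [pvStep_eq] at hx
  exact pvRep_subset '(' ')' l x (pvRep_subset '[' ']' _ x (pvRep_subset '{' '}' _ x
    (pvRep_subset '<' '>' _ x hx)))

theorem pvRep_fixed_no_adj (o c : Char) :
    ∀ l : List Char, pvRep o c l = l → ∀ u v, l = u ++ o :: c :: v → False := by
  intro l
  induction l using pvRep.induct o c with
  | case1 x y t h ih =>
    intro hfix u v heq
    rw [show pvRep o c (x :: y :: t) = pvRep o c t from by simp [pvRep, h.1, h.2]] at hfix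
    have := pvRep_length o c t
    have := congrArg List.length hfix
    simp at this; omega
  | case2 x y t h ih =>
    intro hfix u v heq
    rw [show pvRep o c (x :: y :: t) = x :: pvRep o c (y :: t) from by simp [pvRep, h]] at hfix
    have hfix' : pvRep o c (y :: t) = y :: t := by
      injection hfix
    cases u with
    | nil =>
      simp at heq
      exact h ⟨ heq.1, heq.2.1 ⟩
    | cons a u' =>
      simp at heq
      exact ih hfix' u' v heq.2
  | case3 l h1 =>
    intro hfix u v heq
    cases u with
    | nil => exact h1 o c v heq
    | cons a u' =>
      cases u' with
      | nil => exact h1 a o (c :: v) (by simpa using heq)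
      | cons b u'' => exact h1 a b (u'' ++ o :: c :: v) (by simpa using heq)

theorem pvScanA_cons_open (c : Char) (rest s : List Char)
    (h : ("([{<".toList.contains c) = true) :
    pvScanA (c :: rest) s = pvScanA rest (s ++ [c]) := by
  simp only [pvScanA]; rw [if_pos h]

theorem pvScanA_cons_close (c : Char) (rest s : List Char)
    (h1 : ("([{<".toList.contains c) = false) (h2 : (")]}>".toList.contains c) = true) :
    pvScanA (c :: rest) s =
      match PySem.List.pop? s (-1) with
      | none => none
      | some (p, s') =>
        if PySem.Dict.getD pvSyntaxPairs p ' ' ≠ c then none else pvScanA rest s' := by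
  simp only [pvScanA]; rw [if_neg (by rw [h1]; simp), if_pos h2]

theorem pvScanA_cons_other (c : Char) (rest s : List Char)
    (h1 : ("([{<".toList.contains c) = false) (h2 : (")]}>".toList.contains c) = false) :
    pvScanA (c :: rest) s = pvScanA rest s := by
  simp only [pvScanA]; rw [if_neg (by rw [h1]; simp), if_neg (by rw [h2]; simp)]

theorem pvScanA_append : ∀ (u v s : List Char),
    pvScanA (u ++ v) s = (pvScanA u s).bind (fun s' => pvScanA v s') := by
  intro u
  induction u with
  | nil => intro v s; simp [pvScanA]
  | cons c rest ih =>
    intro v s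
    rw [List.cons_append]
    cases h1 : ("([{<".toList.contains c) with
    | true => rw [pvScanA_cons_open c _ s h1, pvScanA_cons_open c rest s h1, ih]
    | false =>
      cases h2 : (")]}>".toList.contains c) with
      | true =>
        rw [pvScanA_cons_close c _ s h1 h2, pvScanA_cons_close c rest s h1 h2]
        cases hp : PySem.List.pop? s (-1) with
        | none => rfl
        | some pr =>
          obtain ⟨p, s'⟩ := pr
          dsimp only
          by_cases h3 : PySem.Dict.getD pvSyntaxPairs p ' ' ≠ c
          · rw [if_pos h3, if_pos h3]; rfl
          · rw [if_neg h3, if_neg h3]; exact ih v s' 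
      | false => rw [pvScanA_cons_other c _ s h1 h2, pvScanA_cons_other c rest s h1 h2, ih]

theorem pvPop_append (s : List Char) (a : Char) :
    PySem.List.pop? (s ++ [a]) (-1) = some (a, s) := by
  simp [PySem.List.pop?, PySem.List.pyIdx?]
  rw [List.eraseIdx_append_of_length_le le_rfl]
  simp

theorem pvScanA_pvRep (o c : Char) (ho : ("([{<".toList.contains o) = true)
    (hc : PySem.Dict.getD pvSyntaxPairs o ' ' = c) :
    ∀ (l s : List Char), pvScanA (pvRep o c l) s = pvScanA l s := by
  have hcases := pvOpener_cases o ho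
  have hcc : (")]}>".toList.contains c) = true := by
    rcases hcases with rfl | rfl | rfl | rfl <;> (rw [← hc]; decide)
  have hco : ("([{<".toList.contains c) = false := pvCloser_not_opener c hcc
  intro l
  induction l using pvRep.induct o c with
  | case1 x y t h ih =>
    intro s
    rw [show pvRep o c (x :: y :: t) = pvRep o c t from by simp [pvRep, h.1, h.2]]
    obtain ⟨ rfl, rfl ⟩ := h
    rw [ih s]
    simp only [pvScanA, ho, if_true, hco, Bool.false_eq_true, if_false, hcc, pvPop_append, hc]
    simp
  | case2 x y t h ih =>
    intro s
    rw [show pvRep o c (x :: y :: t) = x :: pvRep o c (y :: t) from by simp [pvRep, h]]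
    simp only [pvScanA]
    by_cases hx1 : ("([{<".toList.contains x) = true
    · simp only [hx1, if_true]
      exact ih (s ++ [x])
    · by_cases hx2 : (")]}>".toList.contains x) = true
      · simp only [hx1, hx2, Bool.false_eq_true, if_false, if_true]
        cases hp : PySem.List.pop? s (-1) with
        | none => rfl
        | some pr =>
          by_cases hx3 : PySem.Dict.getD pvSyntaxPairs pr.1 ' ' ≠ x
          · simp [hx3]
          · simp only [hx3, if_false]
            exact ih pr.2
      · simp only [hx1, hx2, Bool.false_eq_true, if_false]
        exact ih s
  | case3 l h1 =>
    intro s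
    cases l with
    | nil => simp [pvRep]
    | cons a t =>
      cases t with
      | nil => simp [pvRep]
      | cons b t' => exact absurd rfl (h1 a b t')

theorem pvScanA_step (l s : List Char) : pvScanA (pvStep l) s = pvScanA l s := by
  rw [pvStep_eq]
  rw [pvScanA_pvRep '<' '>' (by decide) (by decide)]
  rw [pvScanA_pvRep '{' '}' (by decide) (by decide)]
  rw [pvScanA_pvRep '[' ']' (by decide) (by decide)]
  rw [pvScanA_pvRep '(' ')' (by decide) (by decide)]

theorem pvScanA_reduceGo : ∀ (fuel : Nat) (l s : List Char),
    pvScanA (pvReduceGo fuel l) s = pvScanA l s := by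
  intro fuel
  induction fuel with
  | zero => intro l s; rfl
  | succ n ih =>
    intro l s
    simp only [pvReduceGo]
    by_cases hf : pvStep l = l
    · simp [hf]
    · simp only [hf, if_false]
      rw [ih (pvStep l) s, pvScanA_step]

theorem pvReduceGo_subset : ∀ (fuel : Nat) (l : List Char), ∀ x ∈ pvReduceGo fuel l, x ∈ l := by
  intro fuel
  induction fuel with
  | zero => intro l x hx; exact hx
  | succ n ih =>
    intro l x hx
    simp only [pvReduceGo] at hx
    by_cases hf : pvStep l = l
    · simpa [hf] using hx
    · simp only [hf, if_false] at hx
      exact pvStep_subset l x (ih (pvStep l) x hx)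

theorem pvStep_length (l : List Char) (h : pvStep l ≠ l) : (pvStep l).length < l.length := by
  rw [pvStep_eq] at h ⊢
  rcases pvRep_eq_or_lt '(' ')' l with h1 | h1
  · rw [h1] at h ⊢
    rcases pvRep_eq_or_lt '[' ']' l with h2 | h2
    · rw [h2] at h ⊢
      rcases pvRep_eq_or_lt '{' '}' l with h3 | h3
      · rw [h3] at h ⊢
        rcases pvRep_eq_or_lt '<' '>' l with h4 | h4
        · exact absurd h4 h
        · exact h4
      · have a := pvRep_length '<' '>' (pvRep '{' '}' l)
        omega
    · have a := pvRep_length '{' '}' (pvRep '[' ']' l)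
      have b := pvRep_length '<' '>' (pvRep '{' '}' (pvRep '[' ']' l))
      omega
  · have a := pvRep_length '[' ']' (pvRep '(' ')' l)
    have b := pvRep_length '{' '}' (pvRep '[' ']' (pvRep '(' ')' l))
    have c' := pvRep_length '<' '>' (pvRep '{' '}' (pvRep '[' ']' (pvRep '(' ')' l)))
    omega

theorem pvReduceGo_fix : ∀ (fuel : Nat) (l : List Char), l.length ≤ fuel →
    pvStep (pvReduceGo fuel l) = pvReduceGo fuel l := by
  intro fuel
  induction fuel with
  | zero =>
    intro l h
    have hl : l = [] := by cases l with | nil => rfl | cons a t => simp at h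
    subst hl
    decide
  | succ n ih =>
    intro l h
    simp only [pvReduceGo]
    by_cases hf : pvStep l = l
    · rw [if_pos hf]; exact hf
    · simp only [hf, if_false]
      have := pvStep_length l hf
      exact ih (pvStep l) (by omega)

theorem pvScanA_openers : ∀ (r s : List Char),
    (∀ ch ∈ r, ("([{<".toList.contains ch) = true) → pvScanA r s = some (s ++ r) := by
  intro r
  induction r with
  | nil => intro s h; simp [pvScanA]
  | cons ch t ih =>
    intro s h
    have hch := h ch (by simp)
    simp only [pvScanA, hch, if_true]
    rw [ih (s ++ [ch]) (fun x hx => h x (by simp [hx]))]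
    simp

theorem pvScanA_residue_none (r : List Char) (hfix : pvStep r = r)
    (hall : ∀ ch ∈ r, ("()[]{}<>".toList.contains ch) = true)
    (hc : r.any (fun ch => ")]}>".toList.contains ch) = true) : pvScanA r [] = none := by
  obtain ⟨ pre, c, suf, hr, hpre, hcl ⟩ :
      ∃ pre c suf, r = pre ++ c :: suf ∧ (∀ ch ∈ pre, (")]}>".toList.contains ch) = false) ∧
        (")]}>".toList.contains c) = true := by
    clear hfix hall
    induction r with
    | nil => simp at hc
    | cons x t iht =>
      by_cases hx : (")]}>".toList.contains x) = true
      · exact ⟨ [], x, t, rfl, by simp, hx ⟩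
      · have ht : t.any (fun ch => ")]}>".toList.contains ch) = true := by
          simp only [List.any_cons, hx, Bool.false_or] at hc
          exact hc
        obtain ⟨ pre, c, suf, h1, h2, h3 ⟩ := iht ht
        refine ⟨ x :: pre, c, suf, by simp [h1], ?_, h3 ⟩
        intro ch hch
        rcases List.mem_cons.mp hch with rfl | hch'
        · exact eq_false_of_ne_true hx
        · exact h2 ch hch'
  have hopen : ∀ ch ∈ pre, ("([{<".toList.contains ch) = true := by
    intro ch hch
    exact pvBracket_split ch (hall ch (by rw [hr]; exact List.mem_append_left _ hch)) (hpre ch hch)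
  subst hr
  rw [pvScanA_append]
  rw [pvScanA_openers pre [] hopen]
  simp only [List.nil_append, Option.bind_some]
  have hcop : ("([{<".toList.contains c) = false := pvCloser_not_opener c hcl
  rcases List.eq_nil_or_concat pre with rfl | ⟨ pre', o, rfl ⟩
  · rw [pvScanA_cons_close c suf [] hcop hcl]
    rfl
  · have ho : ("([{<".toList.contains o) = true := hopen o (by simp)
    have hmm : PySem.Dict.getD pvSyntaxPairs o ' ' ≠ c := by
      intro heq
      obtain ⟨ f1, f2, f3, f4 ⟩ := pvStep_fixed_rep _ hfix
      have hadj : pre'.concat o ++ c :: suf = pre' ++ o :: c :: suf := by simp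
      rcases pvOpener_cases o ho with rfl | rfl | rfl | rfl
      · have : c = ')' := by rw [← heq]; decide
        subst this
        exact pvRep_fixed_no_adj '(' ')' _ f1 pre' suf hadj
      · have : c = ']' := by rw [← heq]; decide
        subst this
        exact pvRep_fixed_no_adj '[' ']' _ f2 pre' suf hadj
      · have : c = '}' := by rw [← heq]; decide
        subst this
        exact pvRep_fixed_no_adj '{' '}' _ f3 pre' suf hadj
      · have : c = '>' := by rw [← heq]; decide
        subst this
        exact pvRep_fixed_no_adj '<' '>' _ f4 pre' suf hadj
    rw [pvScanA_cons_close c suf (pre'.concat o) hcop hcl]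
    rw [show pre'.concat o = pre' ++ [o] from by simp, pvPop_append]
    dsimp only
    rw [if_pos hmm]

theorem pvScanA_filter : ∀ (l s : List Char),
    pvScanA l s = pvScanA (l.filter (fun ch => "()[]{}<>".toList.contains ch)) s := by
  intro l
  induction l with
  | nil => intro s; rfl
  | cons ch t ih =>
    intro s
    by_cases h1 : ("([{<".toList.contains ch) = true
    · have hb := pvOpener_bracket ch h1
      simp only [List.filter_cons, hb, if_true, pvScanA, h1]
      exact ih (s ++ [ch])
    · by_cases h2 : (")]}>".toList.contains ch) = true
      · have hb := pvCloser_bracket ch h2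
        simp only [List.filter_cons, hb, if_true, pvScanA, h1, h2, Bool.false_eq_true, if_false,
          if_true]
        cases hp : PySem.List.pop? s (-1) with
        | none => rfl
        | some pr =>
          by_cases h3 : PySem.Dict.getD pvSyntaxPairs pr.1 ' ' ≠ ch
          · simp [h3]
          · simp only [h3, if_false]
            exact ih pr.2
      · have hb : ("()[]{}<>".toList.contains ch) = false := by
          by_contra hb'
          have hb'' : ("()[]{}<>".toList.contains ch) = true := by
            cases hcc : ("()[]{}<>".toList.contains ch) with
            | true => rfl
            | false => exact absurd hcc hb'
          exact h1 (pvBracket_split ch hb'' (eq_false_of_ne_true h2))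
        simp only [List.filter_cons, hb, Bool.false_eq_true, if_false, pvScanA, h1, h2]
        exact ih s

theorem pvLine_eq (line : List Char) :
    Option.map pvScoreStack (pvScanA line []) = pvLineB line := by
  rw [pvScanA_filter line []]
  unfold pvLineB pvReduce
  set f := line.filter (fun ch => "()[]{}<>".toList.contains ch) with hf
  rw [← pvScanA_reduceGo f.length f []]
  set residue := pvReduceGo f.length f with hres
  have hfix : pvStep residue = residue := pvReduceGo_fix f.length f le_rfl
  have hall : ∀ ch ∈ residue, ("()[]{}<>".toList.contains ch) = true := by
    intro ch hch
    have := pvReduceGo_subset f.length f ch hch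
    rw [hf] at this
    exact (List.mem_filter.mp this).2
  by_cases hc : residue.any (fun ch => ")]}>".toList.contains ch) = true
  · rw [pvScanA_residue_none residue hfix hall hc]
    rw [if_pos hc]
    rfl
  · have hcf : residue.any (fun ch => ")]}>".toList.contains ch) = false :=
      eq_false_of_ne_true hc
    have hop : ∀ ch ∈ residue, ("([{<".toList.contains ch) = true := by
      intro ch hch
      have hn : (")]}>".toList.contains ch) = false := by
        rcases List.any_eq_false.mp hcf ch hch with h'
        exact eq_false_of_ne_true h'
      exact pvBracket_split ch (hall ch hch) hn
    rw [pvScanA_openers residue [] hop]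
    rw [if_neg hc]
    rfl

theorem part2_eq_alt (data : String) : part2 data = part2_alt data := by
  unfold part2 part2_alt
  have hbody : (fun (scores : List Int) (line : String) =>
      match pvScanA line.toList [] with
      | none => scores
      | some s => scores ++ [pvScoreStack s]) =
      (fun (scores : List Int) (line : String) =>
      match pvLineB line.toList with
      | none => scores
      | some v => scores ++ [v]) := by
    funext scores line
    rw [← pvLine_eq line.toList]
    cases pvScanA line.toList [] <;> simp
  rw [hbody]

-- ===== VERDICT (by name: the statement is the Claim_ definition above) =====
theorem part2_spec : Claim_equal_part2 := by
  intro data _ _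
  unfold Spec_part2
  exact part2_eq_alt data
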